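-- pv_equiv track=rewrite | github.com/jona8888/109-Python-Problems-for-CCPS-109 | labs109.py | is_cyclops
-- ===== SOURCE A (Python) =====
-- def is_cyclops(n):
--     if n == 0:
--         return True
--     a = []
--     while n:
--         last = n % 10
--         a.append(last)
--         n = n // 10
--
--     if len(a) % 2 == 0:
--         return False
--
--     a.reverse()
--     mid = (len(a) - 1) // 2
--     zeros = 0
--     for i in a:
--         if i == 0:
--             zeros = zeros + 1
--
--     if zeros != 1:
--         return False
--
--     if a[mid] == 0:
--         return True
--     else: return False
-- ===== SOURCE B (Python) =====
-- def is_cyclops(n):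
--     s = str(n)
--     return len(s) % 2 == 1 and s.count('0') == 1 and s[len(s) // 2] == '0'
-- ===== Notes on version B (the rewrite author's own statement) =====
-- stated objective: simpler
-- what changed: B inspects the decimal string str(n) (odd length, exactly one '0', middle char '0') instead of A's digit-extraction division loop, list reverse and manual zero-counting loop; equivalence is claimed for n >= 0 since A loops forever on negative n.
-- outside the precondition, e.g. on is_cyclops(-1): A does not finish within the time limit, B returns False
import Mathlib
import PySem

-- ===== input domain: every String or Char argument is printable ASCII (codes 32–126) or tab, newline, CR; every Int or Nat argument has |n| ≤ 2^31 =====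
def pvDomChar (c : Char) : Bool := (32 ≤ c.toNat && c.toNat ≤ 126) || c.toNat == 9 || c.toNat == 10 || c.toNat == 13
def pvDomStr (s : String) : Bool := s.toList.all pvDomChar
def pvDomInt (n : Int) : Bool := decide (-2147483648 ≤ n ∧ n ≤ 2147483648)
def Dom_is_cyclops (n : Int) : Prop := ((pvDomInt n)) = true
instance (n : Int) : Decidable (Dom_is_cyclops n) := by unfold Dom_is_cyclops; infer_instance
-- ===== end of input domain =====

-- B checks str(n) directly (odd length, one '0', middle char '0') instead of A's division
-- loop + reverse + zero-counting loop; equal for all n ≥ 0 (A loops forever on negative n).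


-- ===== PORT A =====
-- A's 'while n:' digit loop; the 'n ≤ 0 → stop' guard is a totality guard only:
-- on Pre_ (0 ≤ n) the loop is entered exactly while n ≠ 0, as in Python
-- (Python diverges for n < 0, which Pre_ excludes).
def aDigits (n : Int) (acc : List Int) : List Int :=
  if _h : 0 < n then
    aDigits (PySem.Int.floordiv n 10) (acc ++ [PySem.Int.mod n 10])
  else acc
termination_by n.toNat
decreasing_by
  rw [PySem.Int.floordiv_eq_ediv_of_pos (by norm_num)]
  omega

def is_cyclops (n : Int) : Bool :=
  if n == 0 then true
  else
    let a := aDigits n []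
    if a.length % 2 == 0 then false
    else
      let a := a.reverse
      let mid := (a.length - 1) / 2
      let zeros := a.foldl (fun z i => if i == 0 then z + 1 else z) (0 : Int)
      if zeros != 1 then false
      else if PySem.List.pyGetD a (mid : Int) 0 == 0 then true
      else false

-- ===== PORT B =====
-- str(n) is ported on the char-list side (PySem.Int.toChars = (PySem.Int.toStr n).toList).
def is_cyclops_alt (n : Int) : Bool :=
  let s := PySem.Int.toChars n
  decide (s.length % 2 = 1) && (PySem.Chars.count s ['0'] == 1)
    && (PySem.List.pyGetD s (PySem.Int.floordiv (s.length : Int) 2) 'x' == '0')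

-- ===== PRECONDITION & SPEC =====
-- Pre_ excludes n < 0, on which Python A never returns (the 'while n' loop runs forever
-- once n reaches -1, since (-1) // 10 == -1).
def Pre_is_cyclops (n : Int) : Prop := 0 ≤ n
instance (n : Int) : Decidable (Pre_is_cyclops n) := by unfold Pre_is_cyclops; infer_instance
def pvWitness_is_cyclops : Int := (102)

def Spec_is_cyclops (n : Int) (out : Bool) : Prop := out = is_cyclops_alt n
instance (n : Int) (out : Bool) : Decidable (Spec_is_cyclops n out) := by unfold Spec_is_cyclops; infer_instance

-- ===== CLAIM (what is proved, stated in full; the proofs are below) =====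
def Claim_equal_is_cyclops : Prop := ∀ (n : Int), Dom_is_cyclops n → Pre_is_cyclops n → Spec_is_cyclops n (is_cyclops n)

-- ===== LEMMAS AND PROOFS =====

-- LSB-first decimal digits of a natural number (proof-side reference list).
def digitsL : Nat → List Nat
  | 0 => []
  | m + 1 => ((m + 1) % 10) :: digitsL ((m + 1) / 10)
decreasing_by exact Nat.div_lt_self (Nat.succ_pos m) (by norm_num)

lemma digitsL_pos {m : Nat} (h : 0 < m) : digitsL m = m % 10 :: digitsL (m / 10) := by
  cases m with
  | zero => omega
  | succ k => rw [digitsL]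

lemma mem_digitsL_lt {m d : Nat} (h : d ∈ digitsL m) : d < 10 := by
  induction m using Nat.strong_induction_on with
  | _ m ih =>
    cases m with
    | zero => simp [digitsL] at h
    | succ k =>
      rw [digitsL] at h
      rcases List.mem_cons.mp h with h | h
      · omega
      · exact ih _ (Nat.div_lt_self (Nat.succ_pos k) (by norm_num)) h

lemma aDigits_eq (m : Nat) (acc : List Int) :
    aDigits (m : Int) acc = acc ++ (digitsL m).map (fun d => Int.ofNat d) := by
  induction m using Nat.strong_induction_on generalizing acc with
  | _ m ih =>
    rw [aDigits]
    cases Nat.eq_zero_or_pos m with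
    | inl h0 => simp [h0, digitsL]
    | inr hpos =>
      rw [dif_pos (by exact_mod_cast hpos)]
      rw [show PySem.Int.floordiv (m : Int) 10 = ((m / 10 : Nat) : Int) from by
            exact_mod_cast PySem.Int.floordiv_natCast m 10,
          show PySem.Int.mod (m : Int) 10 = ((m % 10 : Nat) : Int) from by
            exact_mod_cast PySem.Int.mod_natCast m 10]
      rw [ih (m / 10) (Nat.div_lt_self hpos (by norm_num))]
      rw [digitsL_pos hpos]
      simp

lemma aDigits_nil (m : Nat) :
    aDigits (m : Int) [] = (digitsL m).map (fun d => Int.ofNat d) := by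
  simpa using aDigits_eq m []

lemma toDigitsCore_eq (fuel : Nat) : ∀ (m : Nat) (ds : List Char), 0 < m → m < fuel →
    Nat.toDigitsCore 10 fuel m ds = ((digitsL m).map Nat.digitChar).reverse ++ ds := by
  induction fuel with
  | zero => intro m ds h hf; omega
  | succ f ih =>
    intro m ds hm hf
    rw [Nat.toDigitsCore]
    by_cases h10 : m / 10 = 0
    · rw [if_pos h10, digitsL_pos hm, h10]
      simp [digitsL]
    · rw [if_neg h10]
      rw [ih (m / 10) _ (Nat.pos_of_ne_zero h10)
            (by have := Nat.div_lt_self hm (by norm_num : (1:Nat) < 10); omega)]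
      rw [digitsL_pos hm]
      simp

lemma toChars_pos {n : Int} (h : 0 < n) :
    PySem.Int.toChars n = ((digitsL n.toNat).map Nat.digitChar).reverse := by
  rw [PySem.Int.toChars, if_neg (by omega)]
  rw [Nat.toDigits, toDigitsCore_eq (n.toNat + 1) n.toNat [] (by omega) (by omega)]
  simp

lemma countGo_eq (fuel : Nat) : ∀ (s : List Char) (acc : Nat), s.length ≤ fuel →
    PySem.Chars.count.go ['0'] fuel s acc = acc + s.count '0' := by
  induction fuel with
  | zero =>
    intro s acc h
    rw [PySem.Chars.count.go.eq_def]
    cases s with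
    | nil => simp
    | cons c t => simp at h
  | succ f ih =>
    intro s acc h
    rw [PySem.Chars.count.go.eq_def]
    cases s with
    | nil => simp
    | cons c t =>
      simp only [List.isPrefixOf, Bool.and_true]
      simp only [List.length_cons] at h
      by_cases hc : c = '0'
      · rw [if_pos (by simp [hc])]
        rw [show List.drop ['0'].length (c :: t) = t from rfl]
        rw [ih t (acc + 1) (by omega)]
        simp [hc]
        omega
      · rw [if_neg (by simp only [beq_iff_eq]; exact fun hh => hc hh.symm)]
        rw [ih t acc (by omega)]
        simp [hc]

lemma charsCount_eq (s : List Char) : PySem.Chars.count s ['0'] = s.count '0' := by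
  rw [PySem.Chars.count]
  simp only [List.isEmpty_cons, if_false, Bool.false_eq_true]
  rw [countGo_eq s.length s 0 (le_refl _)]
  omega

lemma digitChar_eq_zero_iff {d : Nat} (h : d < 10) : Nat.digitChar d = '0' ↔ d = 0 := by
  interval_cases d <;> simp [Nat.digitChar]

-- count of '0' chars equals count of digit 0, over any sublist of digits < 10
lemma count_map_digitChar {L : List Nat} (h : ∀ d ∈ L, d < 10) :
    (L.map Nat.digitChar).count '0' = L.count 0 := by
  induction L with
  | nil => rfl
  | cons d t ih =>
    simp only [List.map_cons, List.count_cons, ih (fun x hx => h x (List.mem_cons_of_mem d hx))]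
    have hd := h d (List.mem_cons_self ..)
    by_cases h0 : d = 0
    · simp [h0, Nat.digitChar]
    · have : ¬ Nat.digitChar d = '0' := fun hc => h0 ((digitChar_eq_zero_iff hd).mp hc)
      simp [h0, beq_iff_eq, this]

lemma count_cast_int (L : List Nat) :
    (L.map (fun d => Int.ofNat d)).countP (fun i => i == 0) = L.count 0 := by
  induction L with
  | nil => rfl
  | cons d t ih =>
    rw [List.map_cons, List.countP_cons, List.count_cons, ih]
    by_cases h : d = 0
    · subst h; norm_num
    · have h1 : (Int.ofNat d == 0) = false := by simp [h]
      have h2 : (d == 0) = false := by simp [h]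
      rw [h1, h2]

-- ===== VERDICT (by name: the statement is the Claim_ definition above) =====
theorem is_cyclops_spec : Claim_equal_is_cyclops := by
  intro n _ hpre
  unfold Spec_is_cyclops
  by_cases h0 : n = 0
  · subst h0; decide
  · have hpos : 0 < n := lt_of_le_of_ne hpre (Ne.symm h0)
    set m := n.toNat with hm
    have hn : n = (m : Int) := by omega
    set L := digitsL m with hL
    have hLne : L ≠ [] := by
      rw [hL, digitsL_pos (by omega)]; simp
    have hlt : ∀ d ∈ L, d < 10 := fun d hd => mem_digitsL_lt hd
    -- unfold both sides
    rw [is_cyclops, is_cyclops_alt, if_neg (by simp [h0])]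
    rw [hn, aDigits_nil m, toChars_pos (by omega), ← hn, hm, ← hL]
    -- lengths
    have hlenc : ((L.map Nat.digitChar).reverse).length = L.length := by simp
    by_cases hodd : L.length % 2 = 1
    case neg =>
      -- even length: A returns false at the first test, B's first conjunct is false
      rw [if_pos (by simp; omega)]
      rw [hlenc]
      simp [hodd]
    case pos =>
      rw [if_neg (by simp; omega)]
      -- zeros count
      have hz : (L.map (fun d => Int.ofNat d)).reverse.foldl
          (fun z i => if i == 0 then z + 1 else z) (0 : Int) = (L.count 0 : Int) := by
        rw [PySem.List.foldl_count_if (fun i => i == 0)]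
        rw [List.countP_reverse, count_cast_int]
        simp
      have hcnt : PySem.Chars.count ((L.map Nat.digitChar).reverse) ['0'] = L.count 0 := by
        rw [charsCount_eq, List.count_reverse, count_map_digitChar hlt]
      by_cases hone : L.count 0 = 1
      case neg =>
        rw [if_pos (by rw [hz]; simp [hone])]
        simp [hcnt, hone, hlenc, hodd]
      case pos =>
        rw [if_neg (by rw [hz, hone]; simp)]
        -- middle element
        have hmidA : ((L.map (fun d => Int.ofNat d)).reverse.length - 1) / 2 = (L.length - 1) / 2 := by
          simp
        have hmidB : PySem.Int.floordiv ((((L.map Nat.digitChar).reverse).length : Int)) 2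
            = (((L.length - 1) / 2 : Nat) : Int) := by
          rw [hlenc]
          rw [show ((L.length : Int)) = (((L.length : Nat)) : Int) from rfl]
          rw [show PySem.Int.floordiv ((L.length : Nat) : Int) 2 = ((L.length / 2 : Nat) : Int) from by
                exact_mod_cast PySem.Int.floordiv_natCast L.length 2]
          congr 1
          omega
        have hk : (L.length - 1) / 2 < L.length := by
          have : 0 < L.length := List.length_pos_of_ne_nil hLne
          omega
        -- both pyGetD's hit index k of the same reversed digit list
        set k := (L.length - 1) / 2 with hkdef
        have hA : PySem.List.pyGetD ((L.map (fun d => Int.ofNat d)).reverse)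
            ((((L.map (fun d => Int.ofNat d)).reverse.length - 1) / 2 : Nat) : Int) (0 : Int)
            = ((L.reverse[k]'(by simpa using hk) : Nat) : Int) := by
          rw [hmidA, PySem.List.pyGetD_natCast, ← List.map_reverse]
          rw [List.getD_eq_getElem _ _ (by simpa using hk)]
          simp
        have hB : PySem.List.pyGetD ((L.map Nat.digitChar).reverse)
            (PySem.Int.floordiv ((((L.map Nat.digitChar).reverse).length : Int)) 2) 'x'
            = Nat.digitChar (L.reverse[k]'(by simpa using hk)) := by
          rw [hmidB, PySem.List.pyGetD_natCast, ← List.map_reverse]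
          rw [List.getD_eq_getElem _ _ (by simpa using hk)]
          simp
        simp only [hA, hB]
        have hdk : L.reverse[k]'(by simpa using hk) < 10 := by
          apply hlt
          exact List.mem_reverse.mp (List.getElem_mem _)
        by_cases hzero : L.reverse[k]'(by simpa using hk) = 0
        · have l1 : (((L.reverse[k]'(by simpa using hk) : Nat) : Int) == 0) = true := by
            rw [hzero]; rfl
          have l3 : (Nat.digitChar (L.reverse[k]'(by simpa using hk)) == '0') = true := by
            rw [hzero]; rfl
          simp only [l1, l3, hlenc, hcnt, hone]
          simp [hodd]
        · have hch : ¬ Nat.digitChar (L.reverse[k]'(by simpa using hk)) = '0' :=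
            fun hc => hzero ((digitChar_eq_zero_iff hdk).mp hc)
          have l1 : (((L.reverse[k]'(by simpa using hk) : Nat) : Int) == 0) = false :=
            beq_eq_false_iff_ne.mpr (by exact_mod_cast hzero)
          have l3 : (Nat.digitChar (L.reverse[k]'(by simpa using hk)) == '0') = false :=
            beq_eq_false_iff_ne.mpr hch
          simp only [l1, l3, hlenc, hcnt, hone]
          simp
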